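-- pv_equiv track=rewrite | github.com/MaloBab/autoFPack | backend/App/routes/export_project.py | _build_selections_data
-- ===== SOURCE A (Python) =====
-- from typing import List, Dict, Any, Optional
--
-- def _build_selections_data(selections: List[Dict[str, Any]]) -> Dict[str, Any]:
--     """Construit les données des sélections par groupe"""
--     selections_data = {}
--
--     for selection in selections:
--         groupe_nom = selection['groupe_nom']
--         item_nom = selection['item_nom']
--
--         if groupe_nom not in selections_data:
--             selections_data[groupe_nom] = []
--
--         selections_data[groupe_nom].append(item_nom)
--
--     for groupe_nom, items in selections_data.items():
--         selections_data[groupe_nom] = ', '.join(items)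
--
--     return selections_data
-- ===== SOURCE B (Python) =====
-- from typing import List, Dict, Any, Optional
--
-- def _build_selections_data(selections: List[Dict[str, Any]]) -> Dict[str, Any]:
--     """Collect group names in first-appearance order, then build each joined
--     value by filtering the selections for that group."""
--     order = []
--     for selection in selections:
--         g = selection['groupe_nom']
--         if g not in order:
--             order.append(g)
--     return {g: ', '.join(s['item_nom'] for s in selections if s['groupe_nom'] == g)
--             for g in order}
-- ===== Notes on version B (the rewrite author's own statement) =====
-- stated objective: alternative
-- what changed: Instead of accumulating per-group lists in a dict and then a second join loop over the dict, B first collects the distinct group names in first-appearance order and then builds each value directly by filtering the selections for that group and joining; correct because insertion order of A's dict is first-appearance order and each group's items appear in selection order.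
import Mathlib
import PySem

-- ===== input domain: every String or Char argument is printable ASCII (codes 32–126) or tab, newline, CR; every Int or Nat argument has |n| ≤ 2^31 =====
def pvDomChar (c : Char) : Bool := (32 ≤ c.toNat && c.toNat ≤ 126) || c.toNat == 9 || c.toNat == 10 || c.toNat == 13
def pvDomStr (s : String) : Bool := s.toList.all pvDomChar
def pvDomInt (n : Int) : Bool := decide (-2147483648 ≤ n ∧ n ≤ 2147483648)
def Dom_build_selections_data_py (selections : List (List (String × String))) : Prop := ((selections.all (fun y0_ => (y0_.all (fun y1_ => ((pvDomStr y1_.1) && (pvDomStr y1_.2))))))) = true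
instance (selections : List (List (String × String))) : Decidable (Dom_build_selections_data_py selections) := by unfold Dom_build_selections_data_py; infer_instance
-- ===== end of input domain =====

-- B replaces A's two phases (per-group list accumulation in a dict, then a join loop over
-- the dict) by a first-appearance key scan followed by a per-group filter-and-join; an
-- alternative decomposition of the same grouping task.


-- selection['k'] on the assoc-list encoding of a dict: first match (none = KeyError)
def pvLookup (sel : List (String × String)) (k : String) : Option String :=
  (sel.find? (fun p => p.1 == k)).map (·.2)

-- selection['groupe_nom'] / selection['item_nom']; the default "" is never taken under Pre_
def pvGroup (sel : List (String × String)) : String := (pvLookup sel "groupe_nom").getD ""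
def pvItem (sel : List (String × String)) : String := (pvLookup sel "item_nom").getD ""

-- ===== PORT A =====
-- First loop body: ensure the per-group list exists, then append the item.
def pvAStep (d : PySem.Dict String (List String)) (sel : List (String × String)) :
    PySem.Dict String (List String) :=
  let d := if d.contains (pvGroup sel) then d else d.insert (pvGroup sel) ([] : List String)
  d.insert (pvGroup sel) (d.getD (pvGroup sel) [] ++ [pvItem sel])

-- Second loop. Python overwrites each existing key of the SAME dict with the joined string;
-- under the typed encoding we rebuild the dict in the same item order (overwriting an
-- existing key keeps its position, so the orders coincide): exact.
def build_selections_data_py (selections : List (List (String × String))) : List (String × String) :=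
  let d := selections.foldl pvAStep PySem.Dict.empty
  let d2 := d.items.foldl
    (fun (d' : PySem.Dict String String) p => d'.insert p.1 (PySem.Str.join ", " p.2))
    PySem.Dict.empty
  d2.items

-- ===== PORT B =====
-- First loop of Source B: group names in first-appearance order.
def pvKeysStep (acc : List String) (sel : List (String × String)) : List String :=
  if pvGroup sel ∈ acc then acc else acc ++ [pvGroup sel]

-- The dict comprehension: for each group, filter the selections and join their items.
def build_selections_data_py_alt (selections : List (List (String × String))) : List (String × String) :=
  (selections.foldl pvKeysStep []).map (fun g =>
    (g, PySem.Str.join ", " ((selections.filter (fun s => pvGroup s == g)).map pvItem)))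

-- ===== PRECONDITION & SPEC =====
-- Pre_ excludes exactly the inputs where Python A raises KeyError: a selection missing
-- the key 'groupe_nom' or 'item_nom'.
def Pre_build_selections_data_py (selections : List (List (String × String))) : Prop :=
  ∀ sel ∈ selections, (pvLookup sel "groupe_nom").isSome ∧ (pvLookup sel "item_nom").isSome
instance (selections : List (List (String × String))) : Decidable (Pre_build_selections_data_py selections) := by unfold Pre_build_selections_data_py; infer_instance

def pvWitness_build_selections_data_py : (List (List (String × String))) :=
  [[("groupe_nom", "g"), ("item_nom", "x")], [("groupe_nom", "g"), ("item_nom", "y")]]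

def Spec_build_selections_data_py (selections : List (List (String × String))) (out : List (String × String)) : Prop := out = build_selections_data_py_alt selections
instance (selections : List (List (String × String))) (out : List (String × String)) : Decidable (Spec_build_selections_data_py selections out) := by unfold Spec_build_selections_data_py; infer_instance

-- ===== CLAIM =====
def Claim_equal_build_selections_data_py : Prop := ∀ (selections : List (List (String × String))), Dom_build_selections_data_py selections → Pre_build_selections_data_py selections → Spec_build_selections_data_py selections (build_selections_data_py selections)

-- ===== LEMMAS AND PROOFS =====

-- items of a group, in selection order (the value B computes before joining)
def pvItemsFor (sels : List (List (String × String))) (g : String) : List String :=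
  (sels.filter (fun s => pvGroup s == g)).map pvItem

theorem pvMem_keys_foldl (sels : List (List (String × String))) :
    ∀ (acc : List String) (g : String),
      g ∈ sels.foldl pvKeysStep acc ↔ g ∈ acc ∨ ∃ s ∈ sels, pvGroup s = g := by
  induction sels with
  | nil => intro acc g; simp
  | cons s t ih =>
    intro acc g
    rw [List.foldl_cons, ih]
    have hstep : g ∈ pvKeysStep acc s ↔ g ∈ acc ∨ g = pvGroup s := by
      unfold pvKeysStep
      split_ifs with h
      · constructor
        · exact Or.inl
        · rintro (hg | rfl)
          · exact hg
          · exact h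
      · simp
    rw [hstep]
    simp only [List.mem_cons]
    constructor
    · rintro ((hg | rfl) | ⟨a, ha, he⟩)
      · exact Or.inl hg
      · exact Or.inr ⟨s, Or.inl rfl, rfl⟩
      · exact Or.inr ⟨a, Or.inr ha, he⟩
    · rintro (hg | ⟨a, rfl | ha, he⟩)
      · exact Or.inl (Or.inl hg)
      · exact Or.inl (Or.inr he.symm)
      · exact Or.inr ⟨a, ha, he⟩

theorem pvNodup_keys_foldl (sels : List (List (String × String))) :
    ∀ (acc : List String), acc.Nodup → (sels.foldl pvKeysStep acc).Nodup := by
  induction sels with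
  | nil => intro acc h; exact h
  | cons s t ih =>
    intro acc h
    apply ih
    unfold pvKeysStep
    split_ifs with hm
    · exact h
    · simpa using List.Nodup.append h (List.nodup_singleton _) (by simpa using hm)

theorem pvItemsFor_append (sels : List (List (String × String))) (x : List (String × String)) (g : String) :
    pvItemsFor (sels ++ [x]) g
      = pvItemsFor sels g ++ (if pvGroup x == g then [pvItem x] else []) := by
  unfold pvItemsFor
  rw [List.filter_append, List.map_append]
  congr 1
  by_cases h : pvGroup x == g <;> simp [List.filter, h]

theorem pvA_items (sels : List (List (String × String))) :
    (sels.foldl pvAStep PySem.Dict.empty).items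
      = (sels.foldl pvKeysStep []).map (fun g => (g, pvItemsFor sels g)) := by
  induction sels using List.reverseRecOn with
  | nil => simp [PySem.Dict.empty, pvItemsFor]
  | append_singleton sels x ih =>
    rw [List.foldl_append, List.foldl_append]
    set d := sels.foldl pvAStep PySem.Dict.empty with hdd
    set K := sels.foldl pvKeysStep [] with hK
    have hkeys : d.keys = K := by
      simp [PySem.Dict.keys, ih, List.map_map, Function.comp_def]
    have hnd : d.keys.Nodup := by rw [hkeys]; exact pvNodup_keys_foldl sels [] List.nodup_nil
    simp only [List.foldl_cons, List.foldl_nil]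
    set g := pvGroup x with hg
    by_cases hm : g ∈ K
    · -- existing group: overwrite in place
      have hc : d.contains g = true := by
        rw [PySem.Dict.contains_eq_decide_mem_keys, hkeys]; exact decide_eq_true hm
      have hstep : pvAStep d x = d.insert g (d.getD g [] ++ [pvItem x]) := by
        simp [pvAStep, ← hg, hc]
      have hmemd : (g, pvItemsFor sels g) ∈ d.items := by
        rw [ih]; exact List.mem_map_of_mem hm
      have hget : d.getD g [] = pvItemsFor sels g := PySem.Dict.getD_of_mem_items d hmemd hnd []
      have hKstep : pvKeysStep K x = K := by simp [pvKeysStep, ← hg, hm]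
      rw [hstep, PySem.Dict.items_insert_of_contains d _ hc, ih, hKstep, List.map_map]
      apply List.map_congr_left
      intro g' _
      by_cases he : g' = g
      · subst he
        simp [pvItemsFor_append, hget, ← hg]
      · have hne2 : (g == g') = false := by simpa using Ne.symm he
        simp [hne2, pvItemsFor_append, ← hg, he]
    · -- fresh group: append a new entry
      have hc : d.contains g = false := by
        rw [PySem.Dict.contains_eq_decide_mem_keys, hkeys]; exact decide_eq_false hm
      have hstep : pvAStep d x = d.insert g [pvItem x] := by
        simp only [pvAStep, ← hg, hc, Bool.false_eq_true, if_neg, not_false_iff]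
        rw [PySem.Dict.getD_insert_self, PySem.Dict.insert_insert_self]
        rfl
      have hKstep : pvKeysStep K x = K ++ [g] := by simp [pvKeysStep, ← hg, hm]
      have hnone : pvItemsFor sels g = [] := by
        unfold pvItemsFor
        rw [List.filter_eq_nil_iff.mpr, List.map_nil]
        intro s hs
        simp only [beq_iff_eq]
        intro hgs
        exact hm ((pvMem_keys_foldl sels [] g).mpr (Or.inr ⟨s, hs, hgs⟩))
      rw [hstep, PySem.Dict.items_insert_of_not_contains d _ hc, ih, hKstep, List.map_append]
      congr 1
      · apply List.map_congr_left
        intro g' hg'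
        have hne : (g == g') = false := by
          simp only [beq_eq_false_iff_ne, ne_eq]
          rintro rfl; exact hm hg'
        simp [pvItemsFor_append, hne, ← hg]
      · simp [pvItemsFor_append, hnone, ← hg]

theorem build_selections_data_py_spec : Claim_equal_build_selections_data_py := by
  unfold Claim_equal_build_selections_data_py
  intro selections _ _
  unfold Spec_build_selections_data_py build_selections_data_py build_selections_data_py_alt
  dsimp only
  have hitems := pvA_items selections
  have hnd : (selections.foldl pvAStep PySem.Dict.empty).keys.Nodup := by
    have : (selections.foldl pvAStep PySem.Dict.empty).keys = selections.foldl pvKeysStep [] := by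
      simp [PySem.Dict.keys, hitems, List.map_map, Function.comp_def]
    rw [this]; exact pvNodup_keys_foldl selections [] List.nodup_nil
  have hmain := PySem.Dict.items_foldl_insert_fresh
      (selections.foldl pvAStep PySem.Dict.empty).items
      (fun p => p.1) (fun p => PySem.Str.join ", " p.2)
      (PySem.Dict.empty : PySem.Dict String String)
      (by intro a _; simp [PySem.Dict.contains, PySem.Dict.empty])
      (by simpa [PySem.Dict.keys] using hnd)
  rw [hmain, hitems]
  simp [pvItemsFor, PySem.Dict.empty, List.map_map, Function.comp_def]
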